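-- pv_equiv track=rewrite | github.com/ims510/pro_text_pause_prediction | scripts/classification/bert_binary_pos_tagging.py | get_binary_pause_labels
-- ===== SOURCE A (Python) =====
-- def get_binary_pause_labels(text):
--     words = text.split()
--     clean_tokens, labels = [], []
--
--     for word in words:
--         if "cat_" in word:
--             if labels:
--                 labels[-1] = 1  # Mark previous word with a pause
--         else:
--             clean_tokens.append(word)
--             labels.append(0)  # Default to no pause after word
--
--     if len(clean_tokens) != len(labels):
--         raise ValueError("Mismatch between tokens and labels.")
--
--     return clean_tokens, labels
-- ===== SOURCE B (Python) =====
-- def get_binary_pause_labels(text):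
--     words = text.split()
--     kept = [(i, w) for i, w in enumerate(words) if "cat_" not in w]
--     tokens = [w for _, w in kept]
--     nexts = [i for i, _ in kept][1:] + [len(words)]
--     labels = [1 if nxt - i > 1 else 0 for (i, _), nxt in zip(kept, nexts)]
--     return tokens, labels
-- ===== Notes on version B (the rewrite author's own statement) =====
-- stated objective: alternative
-- what changed: B replaces A's single pass with back-patching of labels[-1] by a position-based two-phase computation: it records the index of each clean token via enumerate+filter and derives each pause label from the gap to the next clean token's index (or to the word count for the last token).
import Mathlib
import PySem

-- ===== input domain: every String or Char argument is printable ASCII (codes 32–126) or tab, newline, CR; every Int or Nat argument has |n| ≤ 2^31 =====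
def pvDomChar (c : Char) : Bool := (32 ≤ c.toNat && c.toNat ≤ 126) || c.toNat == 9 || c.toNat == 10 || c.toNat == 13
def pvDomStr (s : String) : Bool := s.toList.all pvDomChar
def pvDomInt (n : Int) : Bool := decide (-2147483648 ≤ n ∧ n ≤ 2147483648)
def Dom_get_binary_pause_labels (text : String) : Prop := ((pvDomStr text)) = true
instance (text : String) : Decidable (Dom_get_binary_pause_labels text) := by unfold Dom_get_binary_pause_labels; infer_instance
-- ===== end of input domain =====

-- B derives pause labels from index gaps between consecutive clean tokens instead of
-- back-patching labels[-1] during a single pass (objective: alternative decomposition).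

-- ===== PORT A =====
-- loop body of A's for-loop (labels[-1] = 1 on a nonempty list is dropLast ++ [1])
def pvStepA (st : List String × List Int) (word : String) : List String × List Int :=
  if PySem.Str.isIn "cat_" word then
    if st.2 ≠ [] then (st.1, st.2.dropLast ++ [1]) else st
  else (st.1 ++ [word], st.2 ++ [0])

def get_binary_pause_labels (text : String) : List String × List Int :=
  let words := PySem.Str.split₀ text
  let st := words.foldl pvStepA ([], [])
  -- Python's final `if len(clean_tokens) != len(labels): raise ValueError` is unreachable:
  -- both lists grow in lockstep, so their lengths are always equal and A always returns st.
  st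

-- ===== PORT B =====
-- B on the split word list: clean tokens with their positions, labels from index gaps
def pvAltCore (words : List String) : List String × List Int :=
  let kept := (PySem.List.enumerate words).filter (fun p => !(PySem.Str.isIn "cat_" p.2))
  let tokens := kept.map (fun p => p.2)
  let nexts := PySem.List.slice (kept.map (fun p => p.1)) (some 1) none ++ [((words.length : Int))]
  let labels := (kept.zip nexts).map (fun p => if p.2 - p.1.1 > 1 then (1 : Int) else 0)
  (tokens, labels)

def get_binary_pause_labels_alt (text : String) : List String × List Int :=
  pvAltCore (PySem.Str.split₀ text)

-- ===== PRECONDITION & SPEC =====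
def Spec_get_binary_pause_labels (text : String) (out : List String × List Int) : Prop := out = get_binary_pause_labels_alt text
instance (text : String) (out : List String × List Int) : Decidable (Spec_get_binary_pause_labels text out) := by unfold Spec_get_binary_pause_labels; infer_instance

-- ===== CLAIM (what is proved, stated in full; the proofs are below) =====
def Claim_equal_get_binary_pause_labels : Prop := ∀ (text : String), Dom_get_binary_pause_labels text → Spec_get_binary_pause_labels text (get_binary_pause_labels text)

-- ===== LEMMAS AND PROOFS =====

-- labels of B, written as a recursion on the kept (index, word) pairs with sentinel n
def pvLab : List (Int × String) → Int → List Int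
  | [], _ => []
  | [(i, _)], n => [if n - i > 1 then (1 : Int) else 0]
  | (i, _) :: (j, w) :: rest, n =>
      (if j - i > 1 then (1 : Int) else 0) :: pvLab ((j, w) :: rest) n

theorem pvLab_length : ∀ (kept : List (Int × String)) (n : Int), (pvLab kept n).length = kept.length
  | [], _ => rfl
  | [(_, _)], _ => rfl
  | (i, u) :: (j, v) :: rest, n => by
      simp [pvLab, pvLab_length ((j, v) :: rest) n]

theorem pvLabZip : ∀ (kept : List (Int × String)) (n : Int),
    (kept.zip (List.tail (kept.map (fun p => p.1)) ++ [n])).map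
      (fun p => if p.2 - p.1.1 > 1 then (1 : Int) else 0) = pvLab kept n
  | [], _ => rfl
  | [(i, u)], n => by simp [pvLab]
  | (i, u) :: (j, v) :: rest, n => by
      simp only [List.map_cons, List.tail_cons, pvLab]
      rw [← pvLabZip ((j, v) :: rest) n]
      simp

theorem pvLab_snoc : ∀ (kept : List (Int × String)) (m : Int) (w : String) (n : Int),
    pvLab (kept ++ [(m, w)]) n = pvLab kept m ++ [if n - m > 1 then (1 : Int) else 0]
  | [], m, w, n => by simp [pvLab]
  | [(i, u)], m, w, n => by simp [pvLab]
  | (i, u) :: (j, v) :: rest, m, w, n => by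
      have ih := pvLab_snoc ((j, v) :: rest) m w n
      simp only [List.cons_append] at ih ⊢
      simp only [pvLab, ih, List.cons_append]

theorem pvLab_patch : ∀ (kept : List (Int × String)) (n : Int),
    (∀ p ∈ kept, p.1 < n) → kept ≠ [] →
    pvLab kept (n + 1) = (pvLab kept n).dropLast ++ [1]
  | [], _, _, hne => absurd rfl hne
  | [(i, u)], n, hlt, _ => by
      have : i < n := hlt (i, u) (by simp)
      simp [pvLab]
      omega
  | (i, u) :: (j, v) :: rest, n, hlt, _ => by
      have ih := pvLab_patch ((j, v) :: rest) n
        (fun p hp => hlt p (List.mem_cons_of_mem _ hp)) (by simp)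
      have hne : pvLab ((j, v) :: rest) n ≠ [] := by
        intro h
        have := pvLab_length ((j, v) :: rest) n
        rw [h] at this
        simp at this
      simp only [pvLab, ih, List.dropLast_cons_of_ne_nil hne, List.cons_append]

theorem pv_enum_lt (ws : List String) (p : Int × String)
    (hp : p ∈ PySem.List.enumerate ws 0) : p.1 < (ws.length : Int) := by
  rw [PySem.List.mem_enumerate_iff] at hp
  obtain ⟨k, hk, rfl⟩ := hp
  simp
  exact_mod_cast hk

-- B's labels on a word list are pvLab of its kept pairs
theorem pvAltCore_eq (ws : List String) :
    pvAltCore ws =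
      (((PySem.List.enumerate ws).filter (fun p => !(PySem.Str.isIn "cat_" p.2))).map (fun p => p.2),
       pvLab ((PySem.List.enumerate ws).filter (fun p => !(PySem.Str.isIn "cat_" p.2))) (ws.length : Int)) := by
  simp only [pvAltCore, PySem.List.slice_from_one]
  rw [pvLabZip]

theorem pvAltCore_snoc (ws : List String) (w : String) :
    pvAltCore (ws ++ [w]) = pvStepA (pvAltCore ws) w := by
  have henum : PySem.List.enumerate (ws ++ [w]) 0
      = PySem.List.enumerate ws 0 ++ [((ws.length : Int), w)] := by
    rw [PySem.List.enumerate_append]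
    simp [PySem.List.enumerate_cons, PySem.List.enumerate_nil]
  rw [pvAltCore_eq, pvAltCore_eq, pvStepA]
  rw [henum, List.filter_append]
  by_cases hc : PySem.Str.isIn "cat_" w = true
  · have hc2 : PySem.Chars.isIn ['c', 'a', 't', '_'] w.toList = true := by simpa using hc
    have hf : List.filter (fun p => !(PySem.Str.isIn "cat_" p.2)) [((ws.length : Int), w)] = [] := by
      simp [List.filter, hc2]
    rw [hf, List.append_nil, if_pos hc]
    have hcast : (((ws ++ [w]).length : Nat) : Int) = (ws.length : Int) + 1 := by simp
    rw [hcast]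
    set kept := (PySem.List.enumerate ws 0).filter (fun p => !(PySem.Str.isIn "cat_" p.2)) with hk
    by_cases hke : kept = []
    · rw [hke]
      simp [pvLab]
    · have hlabne : pvLab kept (ws.length : Int) ≠ [] := by
        intro h
        have := pvLab_length kept (ws.length : Int)
        rw [h] at this
        exact hke (List.eq_nil_of_length_eq_zero this.symm)
      rw [if_pos hlabne]
      have hlt : ∀ p ∈ kept, p.1 < (ws.length : Int) := by
        rw [hk]
        intro p hp
        exact pv_enum_lt ws p (List.mem_of_mem_filter hp)
      rw [pvLab_patch kept (ws.length : Int) hlt hke]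
  · have hc2 : PySem.Chars.isIn ['c', 'a', 't', '_'] w.toList = false := by
      simpa using hc
    have hf : List.filter (fun p => !(PySem.Str.isIn "cat_" p.2)) [((ws.length : Int), w)]
        = [((ws.length : Int), w)] := by
      simp [List.filter, hc2]
    rw [hf, if_neg hc]
    have hcast : (((ws ++ [w]).length : Nat) : Int) = (ws.length : Int) + 1 := by simp
    rw [hcast, pvLab_snoc]
    simp

theorem pvFoldEq : ∀ (ws : List String), ws.foldl pvStepA ([], []) = pvAltCore ws := by
  intro ws
  induction ws using List.reverseRecOn with
  | nil => rfl
  | append_singleton ws w ih =>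
      rw [List.foldl_append, List.foldl_cons, List.foldl_nil, ih, pvAltCore_snoc]

-- ===== VERDICT (by name: the statement is the Claim_ definition above) =====
theorem get_binary_pause_labels_spec : Claim_equal_get_binary_pause_labels := by
  intro text _
  unfold Spec_get_binary_pause_labels get_binary_pause_labels get_binary_pause_labels_alt
  exact pvFoldEq _
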